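-- pv_equiv track=rewrite | github.com/ThiernoB/L3_2015_2016 | AMD5/Complexite/exercice4.py | plusGrandElement
-- ===== SOURCE A (Python) =====
-- def plusGrandElement(E, S):
-- 	if E == None or len(E) == 0:
-- 		return None
--
-- 	tmp = E[:]
--
-- 	if S == None:
-- 		return tmp.pop()
-- 	else:
-- 		for i in S:
-- 			if tmp.count(i) > 0:
-- 				tmp.remove(i)
-- 		return tmp.pop()
-- ===== SOURCE B (Python) =====
-- def plusGrandElement(E, S):
--     if E is None or len(E) == 0:
--         return None
--     cS = {}
--     for x in (S or ()):
--         cS[x] = cS.get(x, 0) + 1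
--     cE = {}
--     for x in E:
--         cE[x] = cE.get(x, 0) + 1
--     for v in reversed(E):
--         cE[v] -= 1
--         if cE[v] >= cS.get(v, 0):
--             return v
--     return None
-- ===== Notes on version B (the rewrite author's own statement) =====
-- stated objective: alternative
-- what changed: Instead of copying E and doing a count+remove scan of the copy for every element of S, B counts S's values in a dict once and scans E from the end with a second count dict, returning the first element whose number of earlier equal occurrences is at least its S-count.
-- crash fix: When E is non-empty but every element of E is removed (each value occurs in S at least as often as in E), A raises IndexError on tmp.pop(); B returns None there. — e.g. on plusGrandElement(some [1], some [1]): A raises IndexError, B returns none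
import Mathlib
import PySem

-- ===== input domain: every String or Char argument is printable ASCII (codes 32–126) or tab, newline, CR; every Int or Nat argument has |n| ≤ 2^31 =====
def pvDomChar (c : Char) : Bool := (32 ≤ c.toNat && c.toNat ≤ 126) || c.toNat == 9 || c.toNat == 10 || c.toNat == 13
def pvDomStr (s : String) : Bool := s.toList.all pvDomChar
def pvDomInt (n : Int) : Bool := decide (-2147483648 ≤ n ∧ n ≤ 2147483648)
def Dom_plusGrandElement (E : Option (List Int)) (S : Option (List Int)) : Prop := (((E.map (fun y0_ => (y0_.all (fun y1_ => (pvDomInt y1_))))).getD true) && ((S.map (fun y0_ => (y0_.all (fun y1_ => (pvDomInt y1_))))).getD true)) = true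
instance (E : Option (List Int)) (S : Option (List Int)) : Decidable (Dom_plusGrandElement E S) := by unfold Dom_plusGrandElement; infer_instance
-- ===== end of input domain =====

-- B replaces A's per-S-element count+remove rescans of a copy of E by two counting dicts
-- and one backward scan of E (objective: alternative algorithm; return value proved equal on Pre_).

-- ===== PORT A =====
def plusGrandElement (E : Option (List Int)) (S : Option (List Int)) : Option Int :=
  match E with
  | none => none
  | some l =>
    if l.length = 0 then none
    else
      match S with
      | none => (PySem.List.pop? l).map Prod.fst
      | some s =>
        -- for i in S: if tmp.count(i) > 0: tmp.remove(i)
        -- (the remove? is guarded by count > 0, so `.getD tmp` never supplies its default)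
        let tmp := s.foldl (fun tmp i =>
          if PySem.List.count tmp i > 0 then (PySem.List.remove? tmp i).getD tmp else tmp) l
        (PySem.List.pop? tmp).map Prod.fst

-- ===== PORT B =====
-- the backward scan `for v in reversed(E): cE[v] -= 1; if cE[v] >= cS.get(v,0): return v`
def pvFindLoop (r : List Int) (cE : PySem.Dict Int Int) (cS : PySem.Dict Int Int) : Option Int :=
  match r with
  | [] => none
  | v :: rest =>
    let cE' := cE.insert v (cE.getD v 0 - 1)
    if cE'.getD v 0 ≥ cS.getD v 0 then some v else pvFindLoop rest cE' cS

def plusGrandElement_alt (E : Option (List Int)) (S : Option (List Int)) : Option Int :=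
  match E with
  | none => none
  | some l =>
    if l.length = 0 then none
    else
      let cS := (S.getD []).foldl (fun d x => d.insert x (d.getD x 0 + 1)) PySem.Dict.empty
      let cE := l.foldl (fun d x => d.insert x (d.getD x 0 + 1)) PySem.Dict.empty
      pvFindLoop l.reverse cE cS

-- ===== PRECONDITION & SPEC =====
-- Pre_ excludes exactly the inputs where A raises IndexError on tmp.pop(): E non-empty but
-- every element removed (each value of E occurs in S at least as often as in E).
def Pre_plusGrandElement (E : Option (List Int)) (S : Option (List Int)) : Prop :=
  (E.elim true (fun l => l.isEmpty || l.any (fun x => (S.getD []).count x < l.count x))) = true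
instance (E : Option (List Int)) (S : Option (List Int)) : Decidable (Pre_plusGrandElement E S) := by unfold Pre_plusGrandElement; infer_instance

def pvWitness_plusGrandElement : Option (List Int) × Option (List Int) := (some [1, 2, 3], some [3])

-- A raises IndexError there (all of E removed); B returns None.
def Raises_plusGrandElement (E : Option (List Int)) (S : Option (List Int)) : Prop :=
  (E.elim false (fun l => !l.isEmpty && l.all (fun x => l.count x ≤ (S.getD []).count x))) = true
instance (E : Option (List Int)) (S : Option (List Int)) : Decidable (Raises_plusGrandElement E S) := by unfold Raises_plusGrandElement; infer_instance
def pvRaiseWitness_plusGrandElement : Option (List Int) × Option (List Int) := (some [1], some [1])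
def pvRaiseWitnessOut_plusGrandElement : Option Int := none

def Spec_plusGrandElement (E : Option (List Int)) (S : Option (List Int)) (out : Option Int) : Prop := out = plusGrandElement_alt E S
instance (E : Option (List Int)) (S : Option (List Int)) (out : Option Int) : Decidable (Spec_plusGrandElement E S out) := by unfold Spec_plusGrandElement; infer_instance

-- ===== CLAIM (what is proved, stated in full; the proofs are below) =====
def Claim_equal_plusGrandElement : Prop := ∀ (E : Option (List Int)) (S : Option (List Int)), Dom_plusGrandElement E S → Pre_plusGrandElement E S → Spec_plusGrandElement E S (plusGrandElement E S)
def Claim_raises_plusGrandElement : Prop := (∀ (E : Option (List Int)) (S : Option (List Int)), Dom_plusGrandElement E S → Raises_plusGrandElement E S → ¬ Pre_plusGrandElement E S) ∧ (Dom_plusGrandElement (pvRaiseWitness_plusGrandElement.1) (pvRaiseWitness_plusGrandElement.2) ∧ Raises_plusGrandElement (pvRaiseWitness_plusGrandElement.1) (pvRaiseWitness_plusGrandElement.2) ∧ plusGrandElement_alt (pvRaiseWitness_plusGrandElement.1) (pvRaiseWitness_plusGrandElement.2) = pvRaiseWitnessOut_plusGrandElement)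

-- ===== LEMMAS AND PROOFS =====

-- proof-side model of A's loop: remove from l the first (d v) occurrences of each value v
def pvStrip : List Int → (Int → Nat) → List Int
  | [], _ => []
  | x :: xs, d => if d x = 0 then x :: pvStrip xs d else pvStrip xs (Function.update d x (d x - 1))

-- proof-side model of B's loop: first v (scanning r) whose remaining-count ≥ d v
def pvFindPure : List Int → (Int → Nat) → Option Int
  | [], _ => none
  | v :: rest, d => if d v ≤ rest.count v then some v else pvFindPure rest d

theorem pvStrip_count (l : List Int) (d : Int → Nat) (v : Int) :
    (pvStrip l d).count v = l.count v - d v := by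
  induction l generalizing d with
  | nil => simp [pvStrip]
  | cons x xs ih =>
    unfold pvStrip
    by_cases h0 : d x = 0
    · rw [if_pos h0]
      by_cases hv : x = v
      · subst hv
        rw [List.count_cons_self, List.count_cons_self, ih]
        omega
      · rw [List.count_cons_of_ne hv, List.count_cons_of_ne hv, ih]
    · rw [if_neg h0, ih]
      by_cases hv : x = v
      · subst hv
        rw [List.count_cons_self, Function.update_self]
        omega
      · rw [List.count_cons_of_ne hv, Function.update_of_ne (Ne.symm hv)]

theorem pvStrip_saturate (l : List Int) (d : Int → Nat) (i : Int) (h : l.count i ≤ d i) :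
    pvStrip l (Function.update d i (d i + 1)) = pvStrip l d := by
  induction l generalizing d with
  | nil => rfl
  | cons x xs ih =>
    unfold pvStrip
    by_cases hx : x = i
    · subst hx
      rw [List.count_cons_self] at h
      have hRc : ¬ (Function.update d x (d x + 1) x = 0) := by rw [Function.update_self]; omega
      have hLc : ¬ (d x = 0) := by omega
      rw [if_neg hRc, if_neg hLc, Function.update_self, Function.update_idem]
      have e1 : d x + 1 - 1 = (Function.update d x (d x - 1)) x + 1 := by
        rw [Function.update_self]; omega
      rw [e1, ← Function.update_idem (d x - 1) _ d, ih]
      rw [Function.update_self]; omega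
    · rw [List.count_cons_of_ne hx] at h
      rw [Function.update_of_ne hx]
      by_cases h0 : d x = 0
      · rw [if_pos h0, if_pos h0, ih _ h]
      · rw [if_neg h0, if_neg h0, Function.update_comm (Ne.symm hx)]
        have e2 : Function.update d x (d x - 1) i = d i := Function.update_of_ne (Ne.symm hx) _ _
        rw [← e2]
        exact ih _ (by rw [e2]; exact h)

theorem pvStrip_remove (l : List Int) (d : Int → Nat) (i : Int) (h : d i < l.count i) :
    PySem.List.remove? (pvStrip l d) i = some (pvStrip l (Function.update d i (d i + 1))) := by
  induction l generalizing d with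
  | nil => simp at h
  | cons x xs ih =>
    unfold pvStrip
    by_cases hx : x = i
    · subst hx
      rw [List.count_cons_self] at h
      have hRc : ¬ (Function.update d x (d x + 1) x = 0) := by rw [Function.update_self]; omega
      rw [if_neg hRc, Function.update_self, Function.update_idem]
      by_cases h0 : d x = 0
      · rw [if_pos h0, PySem.List.remove?_cons_self]
        have e1 : d x + 1 - 1 = d x := by omega
        rw [e1, Function.update_eq_self]
      · rw [if_neg h0]
        have hlt : (Function.update d x (d x - 1)) x < xs.count x := by
          rw [Function.update_self]; omega
        rw [ih _ hlt, Function.update_self, Function.update_idem]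
        have e2 : d x - 1 + 1 = d x := by omega
        rw [e2, Function.update_eq_self]
        have e3 : d x + 1 - 1 = d x := by omega
        rw [e3, Function.update_eq_self]
    · rw [List.count_cons_of_ne hx] at h
      rw [Function.update_of_ne hx]
      by_cases h0 : d x = 0
      · rw [if_pos h0, if_pos h0, PySem.List.remove?_cons_of_ne _ hx, ih _ h]
        simp
      · rw [if_neg h0, if_neg h0]
        have e2 : Function.update d x (d x - 1) i = d i := Function.update_of_ne (Ne.symm hx) _ _
        have hlt : (Function.update d x (d x - 1)) i < xs.count i := by rw [e2]; exact h
        rw [ih _ hlt, e2, Function.update_comm (Ne.symm hx)]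

theorem pvStrip_foldl (s l : List Int) (d : Int → Nat) :
    s.foldl (fun tmp i => if PySem.List.count tmp i > 0 then (PySem.List.remove? tmp i).getD tmp else tmp) (pvStrip l d)
      = pvStrip l (fun v => d v + s.count v) := by
  induction s generalizing d with
  | nil => simp
  | cons i rest ih =>
    simp only [List.foldl_cons]
    by_cases h : d i < l.count i
    · have hc : PySem.List.count (pvStrip l d) i > 0 := by
        rw [PySem.List.count_eq, pvStrip_count]; omega
      rw [if_pos hc, pvStrip_remove l d i h]
      simp only [Option.getD_some]
      rw [ih]
      congr 1
      funext v
      by_cases hv : v = i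
      · subst hv
        simp [Function.update_self, List.count_cons_self]
        omega
      · simp [Function.update_of_ne hv, List.count_cons_of_ne (Ne.symm hv)]
    · have hc : ¬ (PySem.List.count (pvStrip l d) i > 0) := by
        rw [PySem.List.count_eq, pvStrip_count]; omega
      rw [if_neg hc, ih]
      have hsat := pvStrip_saturate l (fun v => d v + rest.count v) i
        (by show l.count i ≤ d i + rest.count i; omega)
      rw [← hsat]
      congr 1
      funext v
      by_cases hv : v = i
      · subst hv
        simp [Function.update_self, List.count_cons_self]
        omega
      · simp [Function.update_of_ne hv, List.count_cons_of_ne (Ne.symm hv)]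

theorem pvStrip_append_singleton (a : List Int) (x : Int) (d : Int → Nat) :
    pvStrip (a ++ [x]) d = pvStrip a d ++ (if d x ≤ a.count x then [x] else []) := by
  induction a generalizing d with
  | nil =>
    by_cases h0 : d x = 0
    · rw [List.nil_append, if_pos (by simp; omega)]
      simp [pvStrip, h0]
    · rw [List.nil_append, if_neg (by simp; omega)]
      simp [pvStrip, h0]
  | cons y ys ih =>
    rw [List.cons_append]
    unfold pvStrip
    by_cases h0 : d y = 0
    · rw [if_pos h0, if_pos h0, ih, List.cons_append]
      by_cases hyx : y = x
      · subst hyx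
        rw [List.count_cons_self]
        have : (d y ≤ ys.count y) ↔ (d y ≤ ys.count y + 1) := by omega
        by_cases hc : d y ≤ ys.count y
        · rw [if_pos hc, if_pos (this.mp hc)]
        · rw [if_neg hc, if_neg (by omega)]
      · rw [List.count_cons_of_ne hyx]
    · rw [if_neg h0, if_neg h0, ih]
      by_cases hyx : y = x
      · subst hyx
        rw [List.count_cons_self, Function.update_self]
        have h1 : d y ≥ 1 := by omega
        by_cases hc : d y ≤ ys.count y + 1
        · rw [if_pos (by omega), if_pos hc]
        · rw [if_neg (by omega), if_neg hc]
      · rw [List.count_cons_of_ne hyx, Function.update_of_ne (Ne.symm hyx)]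

theorem pvStrip_getLast? (l : List Int) (d : Int → Nat) :
    (pvStrip l d).getLast? = pvFindPure l.reverse d := by
  induction l using List.reverseRecOn with
  | nil => simp [pvStrip, pvFindPure]
  | append_singleton a x ih =>
    rw [pvStrip_append_singleton, List.reverse_append]
    simp only [List.reverse_cons, List.reverse_nil, List.nil_append, List.cons_append, pvFindPure]
    by_cases hc : d x ≤ a.count x
    · rw [if_pos hc, if_pos (by rwa [List.count_reverse])]
      simp
    · rw [if_neg hc, if_neg (by rwa [List.count_reverse])]
      simpa using ih

theorem pvFindLoop_eq_pure (r : List Int) (cE : PySem.Dict Int Int) (cS : PySem.Dict Int Int)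
    (sl : List Int) (hS : cS = PySem.Dict.counter sl)
    (hE : ∀ x, cE.getD x 0 = (r.count x : Int)) :
    pvFindLoop r cE cS = pvFindPure r (fun v => sl.count v) := by
  induction r generalizing cE with
  | nil => simp [pvFindLoop, pvFindPure]
  | cons v rest ih =>
    simp only [pvFindLoop, pvFindPure]
    have hdec : ∀ x, (cE.insert v (cE.getD v 0 - 1)).getD x 0 = (rest.count x : Int) := by
      intro x
      rw [PySem.Dict.getD_insert]
      by_cases hx : x = v
      · subst hx; rw [if_pos rfl, hE x, List.count_cons_self]; push_cast; ring
      · rw [if_neg hx, hE x, List.count_cons_of_ne (fun h => hx h.symm)]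
    have hcond : ((cE.insert v (cE.getD v 0 - 1)).getD v 0 ≥ cS.getD v 0)
               ↔ (sl.count v ≤ rest.count v) := by
      rw [hdec v, hS, PySem.Dict.getD_counter]
      exact ⟨fun h => by exact_mod_cast h, fun h => by exact_mod_cast h⟩
    by_cases hc : sl.count v ≤ rest.count v
    · rw [if_pos (hcond.mpr hc), if_pos hc]
    · rw [if_neg (fun h => hc (hcond.mp h)), if_neg hc]
      exact ih _ hdec

theorem pvFindPure_last (l : List Int) (sl : List Int)
    (h : (pvStrip l (fun v => sl.count v)) ≠ []) :
    (PySem.List.pop? (pvStrip l (fun v => sl.count v))).map Prod.fst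
      = pvFindPure l.reverse (fun v => sl.count v) := by
  rw [← pvStrip_getLast?]
  set t := pvStrip l (fun v => sl.count v) with ht
  have : t = t.dropLast ++ [t.getLast h] := (List.dropLast_append_getLast h).symm
  rw [this, PySem.List.pop?_last, List.getLast?_concat]
  rfl

theorem pvStrip_zero (l : List Int) : pvStrip l (fun _ => 0) = l := by
  induction l with
  | nil => rfl
  | cons y ys ihy => simpa [pvStrip] using ihy

theorem plusGrandElement_spec : Claim_equal_plusGrandElement := by
  intro E S _ hpre
  unfold Spec_plusGrandElement
  match E with
  | none => rfl
  | some l =>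
    unfold Pre_plusGrandElement at hpre
    simp only [Option.elim_some] at hpre
    by_cases hnil : l.length = 0
    · have : l = [] := List.length_eq_zero_iff.mp hnil
      subst this
      simp [plusGrandElement, plusGrandElement_alt]
    · have hany : l.any (fun x => (S.getD []).count x < l.count x) = true := by
        rcases Bool.or_eq_true_iff.mp hpre with h | h
        · exact absurd (List.isEmpty_iff.mp h) (fun h' => hnil (by simp [h']))
        · exact h
      obtain ⟨x0, hx0mem, hx0⟩ := List.any_eq_true.mp hany
      set sl := S.getD [] with hsl
      have hne : pvStrip l (fun v => sl.count v) ≠ [] := by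
        intro hemp
        have hcnt := pvStrip_count l (fun v => sl.count v) x0
        rw [hemp] at hcnt
        simp only [List.count_nil] at hcnt
        have hlt : sl.count x0 < l.count x0 := by simpa using hx0
        omega
      have hB : plusGrandElement_alt (some l) S = pvFindPure l.reverse (fun v => sl.count v) := by
        show (if l.length = 0 then none else
            pvFindLoop l.reverse (l.foldl (fun d x => d.insert x (d.getD x 0 + 1)) PySem.Dict.empty)
              ((S.getD []).foldl (fun d x => d.insert x (d.getD x 0 + 1)) PySem.Dict.empty))
          = pvFindPure l.reverse (fun v => sl.count v)
        rw [if_neg hnil]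
        apply pvFindLoop_eq_pure _ _ _ sl
        · rw [PySem.Dict.foldl_insert_getD_add_one_eq_counter]
        · intro x
          rw [PySem.Dict.foldl_insert_getD_add_one_eq_counter, PySem.Dict.getD_counter, List.count_reverse]
      rw [hB]
      match S with
      | none =>
        have hstrip : pvStrip l (fun v => sl.count v) = l := by
          have e : (fun v => sl.count v) = (fun _ : Int => (0 : Nat)) := by
            funext v; simp [hsl]
          rw [e, pvStrip_zero]
        show (if l.length = 0 then none else (PySem.List.pop? l).map Prod.fst)
          = pvFindPure l.reverse (fun v => sl.count v)
        rw [if_neg hnil, ← pvFindPure_last l sl hne, hstrip]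
      | some s =>
        show (if l.length = 0 then none else
            (PySem.List.pop? (s.foldl (fun tmp i => if PySem.List.count tmp i > 0 then (PySem.List.remove? tmp i).getD tmp else tmp) l)).map Prod.fst)
          = pvFindPure l.reverse (fun v => sl.count v)
        rw [if_neg hnil]
        conv_lhs => rw [← pvStrip_zero l]
        rw [pvStrip_foldl]
        have e : (fun v => 0 + s.count v) = (fun v => sl.count v) := by
          funext v; simp [hsl]
        rw [e]
        exact pvFindPure_last l sl hne

-- ===== VERDICT (by name: the statement is the Claim_ definition above) =====
def plusGrandElement_raises : Claim_raises_plusGrandElement := by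
  unfold Claim_raises_plusGrandElement
  constructor
  · intro E S _ hr hp
    unfold Raises_plusGrandElement at hr
    unfold Pre_plusGrandElement at hp
    match E with
    | none => simp at hr
    | some l =>
      simp only [Option.elim_some] at hr hp
      rcases Bool.and_eq_true_iff.mp hr with ⟨hne, hall⟩
      rcases Bool.or_eq_true_iff.mp hp with h | h
      · rw [Bool.not_eq_eq_eq_not] at hne; simp [h] at hne
      · obtain ⟨x, hx, hlt⟩ := List.any_eq_true.mp h
        have := List.all_eq_true.mp hall x hx
        simp at this hlt; omega
  · exact ⟨by decide, by decide, by decide⟩
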